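-- pv_equiv track=rewrite | github.com/mjjungg/TIL | Algorithm/Programmers/Lv2/124 나라의 숫자.py | solution
-- ===== SOURCE A (Python) =====
-- def solution(n):
--     answer = ''
--
--     while 0 < n:
--         if n % 3 == 0:
--             answer += '4'
--             n //= 3
--             n -= 1
--
--         else:
--             answer += str(n % 3)
--             n //= 3
--
--     return answer[::-1]
-- ===== SOURCE B (Python) =====
-- def solution(n):
--     if n <= 0:
--         return ''
--     # positional base conversion: numbers with L digits occupy [(3**L - 1) // 2, (3**(L+1) - 1) // 2)
--     L = 1
--     while (3 ** (L + 1) - 1) // 2 <= n: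
--         L += 1
--     m = n - (3 ** L - 1) // 2
--     out = ''
--     for i in range(L - 1, -1, -1):
--         out += "124"[m // 3 ** i % 3]
--     return out
-- ===== Notes on version B (the rewrite author's own statement) =====
-- stated objective: alternative
-- what changed: Replaced A's digit-by-digit divide-and-accumulate-then-reverse loop by a positional base conversion: B first finds the digit count by scanning block boundaries, then emits each digit left-to-right by dividing the offset by falling powers of three and indexing a digit-map string, with no reversal.
import Mathlib
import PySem

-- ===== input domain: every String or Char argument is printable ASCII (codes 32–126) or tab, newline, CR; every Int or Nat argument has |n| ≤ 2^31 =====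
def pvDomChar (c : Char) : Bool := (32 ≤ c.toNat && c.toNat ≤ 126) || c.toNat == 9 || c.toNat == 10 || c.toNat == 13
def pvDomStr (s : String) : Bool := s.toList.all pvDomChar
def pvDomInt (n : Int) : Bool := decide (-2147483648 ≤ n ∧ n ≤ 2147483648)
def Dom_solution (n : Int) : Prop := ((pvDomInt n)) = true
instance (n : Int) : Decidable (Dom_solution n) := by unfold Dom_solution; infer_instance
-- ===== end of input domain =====

-- B replaces A's digit-by-digit accumulate-then-reverse loop by a positional base conversion:
-- it first finds the digit count L, then emits each digit left-to-right by dividing by powers of 3; objective: alternative.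

-- ===== PORT A =====
-- the 'while 0 < n' loop, state = (n, answer)
def solutionLoop (n : Int) (answer : String) : String :=
  if _h : 0 < n then
    if PySem.Int.mod n 3 = 0 then
      solutionLoop (PySem.Int.floordiv n 3 - 1) (answer ++ "4")
    else
      solutionLoop (PySem.Int.floordiv n 3) (answer ++ PySem.Int.toStr (PySem.Int.mod n 3))
  else answer
termination_by n.toNat
decreasing_by
  · have := PySem.Int.floordiv_eq_ediv_of_pos (a := n) (b := 3) (by omega)
    omega
  · have := PySem.Int.floordiv_eq_ediv_of_pos (a := n) (b := 3) (by omega)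
    omega

def solution (n : Int) : String :=
  (PySem.Str.slice? (solutionLoop n "") none none (-1)).getD ""   -- answer[::-1]

-- ===== PORT B =====
-- termination helper for the 'while (3**(L+1)-1)//2 <= n' search: the threshold exceeds L
theorem pow3_lb (k : Nat) : 2 * (k : Int) + 1 ≤ (3:Int) ^ k := by
  induction k with
  | zero => norm_num
  | succ k ih =>
    have h3 : (3:Int) ^ (k+1) = 3 ^ k * 3 := pow_succ 3 k
    push_cast
    omega

theorem findL_threshold (L : Nat) (n : Int)
    (h : PySem.Int.floordiv ((3:Int) ^ (L + 1) - 1) 2 ≤ n) : (L : Int) + 1 ≤ n := by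
  rw [PySem.Int.floordiv_eq_ediv_of_pos (by norm_num)] at h
  have hp := pow3_lb (L + 1)
  have : ((L : Int) + 1) ≤ ((3:Int) ^ (L + 1) - 1) / 2 := by
    rw [Int.le_ediv_iff_mul_le (by norm_num)]
    push_cast at hp ⊢
    omega
  omega

-- the 'while' loop searching the digit count L (Python's L is always a positive int, kept as Nat)
def findL (n : Int) (L : Nat) : Nat :=
  if h : PySem.Int.floordiv ((3:Int) ^ (L + 1) - 1) 2 ≤ n then findL n (L + 1) else L
termination_by n.toNat + 1 - L
decreasing_by
  have := findL_threshold L n h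
  omega

-- 'm // 3 ** i' is ported with exponent i.toNat: in the range below i is always ≥ 0;
-- '"124"[...]' : the index is a % 3 of a nonnegative number, always in range, so .getD ' ' is never taken
def solution_alt (n : Int) : String :=
  if 0 < n then
    let L := findL n 1
    let m := n - PySem.Int.floordiv ((3:Int) ^ L - 1) 2
    (PySem.List.pyRange ((L : Int) - 1) (-1) (-1)).foldl
      (fun out i =>
        out ++ String.ofList
          [(PySem.Str.pyGet? "124"
              (PySem.Int.mod (PySem.Int.floordiv m ((3:Int) ^ i.toNat)) 3)).getD ' '])
      ""
  else ""

-- ===== PRECONDITION & SPEC =====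
def Spec_solution (n : Int) (out : String) : Prop := out = solution_alt n
instance (n : Int) (out : String) : Decidable (Spec_solution n out) := by unfold Spec_solution; infer_instance

-- ===== CLAIM (what is proved, stated in full; the proofs are below) =====
def Claim_equal_solution : Prop := ∀ (n : Int), Dom_solution n → Spec_solution n (solution n)

-- ===== LEMMAS AND PROOFS =====

-- proof-side middleman: the same string as a recursion emitting digits in final order
def recB (n : Int) : String :=
  if _h : 0 < n then
    if PySem.Int.mod n 3 = 0 then recB (PySem.Int.floordiv n 3 - 1) ++ "4"
    else recB (PySem.Int.floordiv n 3) ++ PySem.Int.toStr (PySem.Int.mod n 3)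
  else ""
termination_by n.toNat
decreasing_by
  · have := PySem.Int.floordiv_eq_ediv_of_pos (a := n) (b := 3) (by omega)
    omega
  · have := PySem.Int.floordiv_eq_ediv_of_pos (a := n) (b := 3) (by omega)
    omega

-- one-step unfoldings of A's loop
theorem loop_step0 (n : Int) (h : 0 < n) (hm : PySem.Int.mod n 3 = 0) (a : String) :
    solutionLoop n a = solutionLoop (PySem.Int.floordiv n 3 - 1) (a ++ "4") := by
  rw [solutionLoop, dif_pos h, if_pos hm]

theorem loop_step1 (n : Int) (h : 0 < n) (hm : ¬ PySem.Int.mod n 3 = 0) (a : String) :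
    solutionLoop n a = solutionLoop (PySem.Int.floordiv n 3) (a ++ PySem.Int.toStr (PySem.Int.mod n 3)) := by
  rw [solutionLoop, dif_pos h, if_neg hm]

theorem loop_stop (n : Int) (h : ¬ 0 < n) (a : String) : solutionLoop n a = a := by
  rw [solutionLoop, dif_neg h]

-- the loop only appends to the accumulator: answer is a prefix
theorem solutionLoop_acc (n : Int) :
    ∀ answer, (solutionLoop n answer).toList = answer.toList ++ (solutionLoop n "").toList := by
  induction n using recB.induct with
  | case1 n h hr ih =>
    intro a
    rw [loop_step0 n h hr a, loop_step0 n h hr "", ih, ih ("" ++ "4")]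
    simp
  | case2 n h hr ih =>
    intro a
    rw [loop_step1 n h hr a, loop_step1 n h hr "", ih, ih ("" ++ PySem.Int.toStr (PySem.Int.mod n 3))]
    simp
  | case3 n h =>
    intro a
    rw [loop_stop n h a, loop_stop n h ""]
    simp

-- reversing A's digit list gives recB's string
theorem solutionLoop_rev (n : Int) :
    (solutionLoop n "").toList.reverse = (recB n).toList := by
  induction n using recB.induct with
  | case1 n h hr ih =>
    rw [loop_step0 n h hr "", recB]
    simp only [dif_pos h]
    rw [if_pos hr, solutionLoop_acc, List.reverse_append, ih]
    simp
  | case2 n h hr ih =>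
    rw [loop_step1 n h hr "", recB]
    simp only [dif_pos h]
    rw [if_neg hr, solutionLoop_acc, List.reverse_append, ih]
    have hm := PySem.Int.mod_eq_emod_of_pos (a := n) (b := 3) (by norm_num)
    have hr' : ¬ PySem.Int.mod n 3 = 0 := hr
    rw [hm] at hr'
    have h12 : PySem.Int.mod n 3 = 1 ∨ PySem.Int.mod n 3 = 2 := by rw [hm]; omega
    rcases h12 with h12 | h12 <;> rw [h12] <;> simp <;> rfl
  | case3 n h =>
    rw [loop_stop n h "", recB]
    simp [h]

-- A's result is recB
theorem solution_eq_recB (n : Int) : solution n = recB n := by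
  unfold solution
  rw [PySem.Str.slice?_none_none_neg_one]
  simp only [Option.getD_some]
  rw [solutionLoop_rev n, String.ofList_toList]

-- ---- B-side: block starts and digit characterisation ----

-- start of the block of L-digit numerals
def st (L : Nat) : Int := ((3:Int) ^ L - 1) / 2

theorem st_eq (L : Nat) : 2 * st L + 1 = (3:Int) ^ L := by
  induction L with
  | zero => decide
  | succ L ih =>
    have h3 : (3:Int) ^ (L+1) = 3 ^ L * 3 := pow_succ 3 L
    unfold st at ih ⊢
    omega

theorem st_nonneg (L : Nat) : 0 ≤ st L := by
  have h := st_eq L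
  have : (1:Int) ≤ 3 ^ L := one_le_pow₀ (by norm_num)
  omega

theorem st_succ (L : Nat) : st (L + 1) = 3 * st L + 1 := by
  have h1 := st_eq L
  have h2 := st_eq (L + 1)
  have h3 : (3:Int) ^ (L+1) = 3 ^ L * 3 := pow_succ 3 L
  omega

-- digit character
def dch (r : Int) : Char := if r = 0 then '1' else if r = 1 then '2' else '4'

-- digit list of offset m within the L-digit block, most significant first
def digl : Nat → Int → List Char
  | 0, _ => []
  | L + 1, m => digl L (m / 3) ++ [dch (m % 3)]

theorem recB_st (L : Nat) : ∀ m : Int, 0 ≤ m → m < (3:Int) ^ L →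
    (recB (st L + m)).toList = digl L m := by
  induction L with
  | zero =>
    intro m hm0 hm1
    have hm : m = 0 := by simpa using (by omega : m = 0)
    subst hm
    rw [show st 0 + 0 = (0:Int) by decide, recB]
    simp [digl]
  | succ L ih =>
    intro m hm0 hm1
    have hst := st_succ L
    have hsn := st_nonneg L
    set n := st (L + 1) + m with hn
    have hpos : 0 < n := by omega
    have hmod := PySem.Int.mod_eq_emod_of_pos (a := n) (b := 3) (by norm_num)
    have hdiv := PySem.Int.floordiv_eq_ediv_of_pos (a := n) (b := 3) (by norm_num)
    have h3 : (3:Int) ^ (L+1) = 3 ^ L * 3 := pow_succ 3 L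
    have hq0 : 0 ≤ m / 3 := by omega
    have hq1 : m / 3 < (3:Int) ^ L := by omega
    have hr : m % 3 = 0 ∨ m % 3 = 1 ∨ m % 3 = 2 := by omega
    rcases hr with hr | hr | hr
    · -- m % 3 = 0 : n % 3 = 1, digit '1'
      have h1 : PySem.Int.mod n 3 = 1 := by rw [hmod]; omega
      have h2 : PySem.Int.floordiv n 3 = st L + m / 3 := by rw [hdiv]; omega
      rw [recB, dif_pos hpos, if_neg (by rw [h1]; norm_num), h1, h2]
      simp only [String.toList_append]
      rw [ih (m / 3) hq0 hq1]
      simp [digl, hr, dch]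
      decide
    · -- m % 3 = 1 : n % 3 = 2, digit '2'
      have h1 : PySem.Int.mod n 3 = 2 := by rw [hmod]; omega
      have h2 : PySem.Int.floordiv n 3 = st L + m / 3 := by rw [hdiv]; omega
      rw [recB, dif_pos hpos, if_neg (by rw [h1]; norm_num), h1, h2]
      simp only [String.toList_append]
      rw [ih (m / 3) hq0 hq1]
      simp [digl, hr, dch]
      decide
    · -- m % 3 = 2 : n % 3 = 0, digit '4'
      have h1 : PySem.Int.mod n 3 = 0 := by rw [hmod]; omega
      have h2 : PySem.Int.floordiv n 3 - 1 = st L + m / 3 := by rw [hdiv]; omega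
      rw [recB, dif_pos hpos, if_pos h1, h2]
      simp only [String.toList_append]
      rw [ih (m / 3) hq0 hq1]
      simp [digl, hr, dch]

-- the digit list as a position map (most significant first = reversed range)
theorem digl_eq (L : Nat) : ∀ m : Int, 0 ≤ m →
    digl L m = ((List.range L).map (fun k => dch (m / (3:Int) ^ k % 3))).reverse := by
  induction L with
  | zero => intro m _; simp [digl]
  | succ L ih =>
    intro m hm
    rw [digl, ih (m / 3) (by omega), List.range_succ_eq_map]
    simp only [List.map_cons, List.map_map, List.reverse_cons]
    congr 1
    · congr 1
      apply List.map_congr_left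
      intro k _
      simp only [Function.comp_apply]
      congr 2
      rw [Int.ediv_ediv_of_nonneg (by norm_num)]
      congr 1
      rw [pow_succ']
    · simp

-- findL's specification
theorem findL_spec (n : Int) : ∀ L : Nat, st L ≤ n →
    st (findL n L) ≤ n ∧ n < st (findL n L + 1) ∧ L ≤ findL n L := by
  intro L
  induction L using findL.induct n with
  | case1 L hg ih =>
    intro hL
    have hg' : st (L + 1) ≤ n := by
      unfold st
      rwa [PySem.Int.floordiv_eq_ediv_of_pos (by norm_num)] at hg
    rw [findL, dif_pos hg]
    have := ih hg'
    omega
  | case2 L hg =>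
    intro hL
    have hg' : ¬ st (L + 1) ≤ n := by
      unfold st
      rwa [PySem.Int.floordiv_eq_ediv_of_pos (by norm_num)] at hg
    rw [findL, dif_neg hg]
    omega

-- the string fold over the range appends one character per position
theorem foldl_push (c : Int → Char) : ∀ (xs : List Int) (s : String),
    (xs.foldl (fun out i => out ++ String.ofList [c i]) s).toList = s.toList ++ xs.map c := by
  intro xs
  induction xs with
  | nil => intro s; simp
  | cons x xs ih => intro s; simp [ih]

-- the "124" lookup is the digit character
theorem pyGet124 (r : Int) (h0 : 0 ≤ r) (h3 : r < 3) :
    (PySem.Str.pyGet? "124" r).getD ' ' = dch r := by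
  interval_cases r <;> decide

-- ===== VERDICT (by name: the statement is the Claim_ definition above) =====
theorem solution_spec : Claim_equal_solution := by
  intro n _
  unfold Spec_solution
  rw [solution_eq_recB]
  by_cases hpos : 0 < n
  · unfold solution_alt
    rw [if_pos hpos]
    show recB n =
      (PySem.List.pyRange ((findL n 1 : Int) - 1) (-1) (-1)).foldl
        (fun out i =>
          out ++ String.ofList
            [(PySem.Str.pyGet? "124"
                (PySem.Int.mod (PySem.Int.floordiv
                  (n - PySem.Int.floordiv ((3:Int) ^ (findL n 1) - 1) 2) ((3:Int) ^ i.toNat)) 3)).getD ' '])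
        ""
    set L := findL n 1 with hL
    have hspec := findL_spec n 1 (by rw [show st 1 = 1 by decide]; omega)
    rw [← hL] at hspec
    obtain ⟨hlo, hhi, hL1⟩ := hspec
    have hstm : PySem.Int.floordiv ((3:Int) ^ L - 1) 2 = st L := by
      unfold st
      rw [PySem.Int.floordiv_eq_ediv_of_pos (by norm_num)]
    set m := n - PySem.Int.floordiv ((3:Int) ^ L - 1) 2 with hm
    have hm' : m = n - st L := by rw [hm, hstm]
    have hm0 : 0 ≤ m := by omega
    have hm1 : m < (3:Int) ^ L := by
      have h1 := st_eq L
      have h2 := st_succ L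
      omega
    apply String.toList_inj.mp
    have hn : st L + m = n := by omega
    have hrec : (recB n).toList = digl L m := by rw [← hn]; exact recB_st L m hm0 hm1
    rw [hrec, digl_eq L m hm0]
    rw [PySem.List.pyRange_neg_one_eq_reverse]
    rw [show (-1:Int) + 1 = 0 by norm_num, show (L:Int) - 1 + 1 = (L:Int) by ring]
    rw [PySem.List.pyRange_one]
    rw [foldl_push]
    simp only [List.map_reverse, List.map_map, Int.sub_zero, Int.toNat_natCast]
    simp only [String.toList_empty, List.nil_append]
    congr 1
    apply List.map_congr_left
    intro k _
    simp only [Function.comp_apply]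
    have hk : ((0:Int) + (k:Int)).toNat = k := by omega
    rw [hk]
    have hdv := PySem.Int.floordiv_eq_ediv_of_pos (a := m) (b := (3:Int) ^ k)
      (pow_pos (by norm_num) k)
    have hmd := PySem.Int.mod_eq_emod_of_pos (a := PySem.Int.floordiv m ((3:Int) ^ k)) (b := 3)
      (by norm_num)
    rw [hmd, hdv]
    exact (pyGet124 _ (Int.emod_nonneg _ (by norm_num)) (Int.emod_lt_of_pos _ (by norm_num))).symm
  · unfold solution_alt
    rw [if_neg hpos, recB, dif_neg hpos]
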